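-- pv_equiv track=rewrite | github.com/Nandakumar333/SpecForge | tests/unit/test_prompt_loader.py | _make_large_fixture_content
-- ===== SOURCE A (Python) =====
-- def _make_fixture_content(domain: str, stack: str, rule_id: str) -> str:
--     precedence_map = {
--         "security": 1, "architecture": 2, "backend": 3,
--         "frontend": 3, "database": 3, "testing": 4, "cicd": 5,
--     }
--     precedence = precedence_map.get(domain, 3)
--     return f"""\
-- <!-- Generated by SpecForge - do not edit manually above the Rules section -->
--
-- # {domain.title()} Governance Prompt
--
-- ## Meta
-- domain: {domain}
-- stack: {stack}
-- version: 1.0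
-- precedence: {precedence}
-- checksum: abc123def456
--
-- ## Precedence
-- This file occupies position {precedence} in the conflict-resolution hierarchy:
-- `security (1) > architecture (2) > backend/frontend/database (3) > testing (4) > cicd (5)`
--
-- ## Rules
--
-- ### {rule_id}: Test Rule
-- severity: ERROR
-- scope: all files
-- rule: All code MUST follow the governance rules for {domain}.
-- threshold: max_lines=100, min_coverage=80
-- example_correct: |
--   # correct example for {domain}
-- example_incorrect: |
--   # incorrect example for {domain}
-- """
--
-- def _make_large_fixture_content(domain: str, stack: str, lines: int = 300) -> str:
--     """Generate fixture content with approximately `lines` lines."""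
--     base = _make_fixture_content(domain, stack, f"{domain[:4].upper()}-001")
--     # Pad with additional rules to reach approximate line count
--     extra_rules = []
--     rule_num = 2
--     while len(base.splitlines()) + len("\n".join(extra_rules).splitlines()) < lines:
--         rule_id = f"{domain[:4].upper()}-{rule_num:03d}"
--         extra_rules.append(f"""
-- ### {rule_id}: Extra Rule {rule_num}
-- severity: WARNING
-- scope: all {domain} code
-- rule: Code MUST follow additional governance rule {rule_num} for {domain}.
-- threshold: extra_threshold_{rule_num}=50
-- example_correct: |
--   # extra correct example {rule_num}
-- example_incorrect: |
--   # extra incorrect example {rule_num}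
-- """)
--         rule_num += 1
--     return base + "\n".join(extra_rules)
-- ===== SOURCE B (Python) =====
-- def _make_fixture_content(domain: str, stack: str, rule_id: str) -> str:
--     precedence_map = {
--         "security": 1, "architecture": 2, "backend": 3,
--         "frontend": 3, "database": 3, "testing": 4, "cicd": 5,
--     }
--     precedence = precedence_map.get(domain, 3)
--     return f"""\
-- <!-- Generated by SpecForge - do not edit manually above the Rules section -->
--
-- # {domain.title()} Governance Prompt
--
-- ## Meta
-- domain: {domain}
-- stack: {stack}
-- version: 1.0
-- precedence: {precedence}
-- checksum: abc123def456
--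
-- ## Precedence
-- This file occupies position {precedence} in the conflict-resolution hierarchy:
-- `security (1) > architecture (2) > backend/frontend/database (3) > testing (4) > cicd (5)`
--
-- ## Rules
--
-- ### {rule_id}: Test Rule
-- severity: ERROR
-- scope: all files
-- rule: All code MUST follow the governance rules for {domain}.
-- threshold: max_lines=100, min_coverage=80
-- example_correct: |
--   # correct example for {domain}
-- example_incorrect: |
--   # incorrect example for {domain}
-- """
--
--
-- def _extra_rule(domain: str, rule_num: int) -> str:
--     rule_id = f"{domain[:4].upper()}-{rule_num:03d}"
--     return f"""
-- ### {rule_id}: Extra Rule {rule_num}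
-- severity: WARNING
-- scope: all {domain} code
-- rule: Code MUST follow additional governance rule {rule_num} for {domain}.
-- threshold: extra_threshold_{rule_num}=50
-- example_correct: |
--   # extra correct example {rule_num}
-- example_incorrect: |
--   # extra incorrect example {rule_num}
-- """
--
--
-- def _make_large_fixture_content(domain: str, stack: str, lines: int = 300) -> str:
--     """Generate fixture content with approximately `lines` lines; line totals
--     are maintained incrementally instead of re-joining and re-scanning all
--     accumulated rules on every iteration."""
--     base = _make_fixture_content(domain, stack, f"{domain[:4].upper()}-001")
--     total = len(base.splitlines())
--     extra_rules = []
--     rule_num = 2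
--     while total < lines:
--         block = _extra_rule(domain, rule_num)
--         total += len(block.splitlines()) + (1 if extra_rules else 0)
--         extra_rules.append(block)
--         rule_num += 1
--     return base + "\n".join(extra_rules)
-- ===== Notes on version B (the rewrite author's own statement) =====
-- stated objective: faster
-- what changed: Instead of re-joining all accumulated rule blocks and re-running splitlines over the whole joined text on every loop iteration, B computes each block's line count once and maintains the running line total incrementally (adding 1 for the empty line each join separator creates), joining the blocks a single time at the end.
import Mathlib
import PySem

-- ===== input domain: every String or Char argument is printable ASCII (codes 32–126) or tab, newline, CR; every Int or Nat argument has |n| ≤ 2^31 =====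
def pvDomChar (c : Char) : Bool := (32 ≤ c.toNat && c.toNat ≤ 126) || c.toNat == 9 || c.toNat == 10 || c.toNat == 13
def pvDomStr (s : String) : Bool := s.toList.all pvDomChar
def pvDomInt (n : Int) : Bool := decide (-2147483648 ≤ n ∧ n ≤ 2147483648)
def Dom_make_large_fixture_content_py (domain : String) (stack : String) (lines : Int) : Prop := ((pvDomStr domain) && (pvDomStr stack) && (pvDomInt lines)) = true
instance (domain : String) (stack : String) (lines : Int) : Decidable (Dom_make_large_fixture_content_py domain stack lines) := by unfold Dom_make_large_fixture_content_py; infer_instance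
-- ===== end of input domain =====

-- B replaces A's per-iteration re-join + re-splitlines of all accumulated rule blocks by an
-- incrementally maintained line total (each block's line count is computed once): faster.

-- ===== shared module helper (_make_fixture_content, called by both A and B) =====
-- str.title(), ported by hand (PySem has no title): exact on ASCII (cased = a-z/A-Z);
-- an alphabetic char is uppercased after a non-alphabetic char, lowercased otherwise.
def pvTitleGo : List Char → Bool → List Char
  | [], _ => []
  | c :: rest, prevCased =>
    if PySem.Chars.isalpha c then
      (if prevCased then PySem.Chars.lowerChar c else PySem.Chars.upperChar c) :: pvTitleGo rest true
    else c :: pvTitleGo rest false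

-- the f-string template of _make_fixture_content, split at its placeholders
def pvF1 : List Char := "<!-- Generated by SpecForge - do not edit manually above the Rules section -->\n\n# ".toList
def pvF2 : List Char := " Governance Prompt\n\n## Meta\ndomain: ".toList
def pvF3 : List Char := "\nstack: ".toList
def pvF4 : List Char := "\nversion: 1.0\nprecedence: ".toList
def pvF5 : List Char := "\nchecksum: abc123def456\n\n## Precedence\nThis file occupies position ".toList
def pvF6 : List Char := " in the conflict-resolution hierarchy:\n`security (1) > architecture (2) > backend/frontend/database (3) > testing (4) > cicd (5)`\n\n## Rules\n\n### ".toList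
def pvF7 : List Char := ": Test Rule\nseverity: ERROR\nscope: all files\nrule: All code MUST follow the governance rules for ".toList
def pvF8 : List Char := ".\nthreshold: max_lines=100, min_coverage=80\nexample_correct: |\n  # correct example for ".toList
def pvF9 : List Char := "\nexample_incorrect: |\n  # incorrect example for ".toList
def pvF10 : List Char := "\n".toList

def pvFixture (domain stack rule_id : List Char) : List Char :=
  let pm : PySem.Dict (List Char) Int :=
    ((((((PySem.Dict.empty.insert "security".toList 1).insert "architecture".toList 2).insert
        "backend".toList 3).insert "frontend".toList 3).insert "database".toList 3).insert
        "testing".toList 4).insert "cicd".toList 5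
  let precedence : Int := pm.getD domain 3
  pvF1 ++ pvTitleGo domain false ++ pvF2 ++ domain ++ pvF3 ++ stack ++ pvF4 ++
    PySem.Int.toChars precedence ++ pvF5 ++ PySem.Int.toChars precedence ++ pvF6 ++ rule_id ++
    pvF7 ++ domain ++ pvF8 ++ domain ++ pvF9 ++ domain ++ pvF10

-- the f-string template of the extra-rule block, split at its placeholders
def pvG1 : List Char := "\n### ".toList
def pvG2 : List Char := ": Extra Rule ".toList
def pvG3 : List Char := "\nseverity: WARNING\nscope: all ".toList
def pvG4 : List Char := " code\nrule: Code MUST follow additional governance rule ".toList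
def pvG5 : List Char := " for ".toList
def pvG6 : List Char := ".\nthreshold: extra_threshold_".toList
def pvG7 : List Char := "=50\nexample_correct: |\n  # extra correct example ".toList
def pvG8 : List Char := "\nexample_incorrect: |\n  # extra incorrect example ".toList
def pvG9 : List Char := "\n".toList

-- ===== PORT A =====
-- A's while loop; fuel = lines.toNat + 1 only makes the recursion total (each Python
-- iteration raises the line count by at least one, so the fuel is never exhausted there)
def pvLoopA (domain base : List Char) (lines : Int) :
    List (List Char) → Int → Nat → List (List Char)
  | extras, _, 0 => extras
  | extras, rule_num, fuel + 1 =>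
    if ((PySem.Chars.splitlines base).length : Int) +
        ((PySem.Chars.splitlines (PySem.Chars.join "\n".toList extras)).length : Int) < lines then
      -- rule_id = f"{domain[:4].upper()}-{rule_num:03d}"  (:03d = zfill for the positive rule_num)
      let rule_id := PySem.Chars.upper (PySem.Chars.slice domain none (some 4)) ++ "-".toList ++
        PySem.Chars.zfill (PySem.Int.toChars rule_num) 3
      let block := pvG1 ++ rule_id ++ pvG2 ++ PySem.Int.toChars rule_num ++ pvG3 ++ domain ++
        pvG4 ++ PySem.Int.toChars rule_num ++ pvG5 ++ domain ++ pvG6 ++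
        PySem.Int.toChars rule_num ++ pvG7 ++ PySem.Int.toChars rule_num ++ pvG8 ++
        PySem.Int.toChars rule_num ++ pvG9
      pvLoopA domain base lines (extras ++ [block]) (rule_num + 1) fuel
    else extras

def make_large_fixture_content_py (domain : String) (stack : String) (lines : Int) : String :=
  let base := pvFixture domain.toList stack.toList
    (PySem.Chars.upper (PySem.Chars.slice domain.toList none (some 4)) ++ "-001".toList)
  let extras := pvLoopA domain.toList base lines [] 2 (lines.toNat + 1)
  String.ofList (base ++ PySem.Chars.join "\n".toList extras)

-- ===== PORT B =====
def pvExtraRule (domain : List Char) (rule_num : Int) : List Char :=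
  let rule_id := PySem.Chars.upper (PySem.Chars.slice domain none (some 4)) ++ "-".toList ++
    PySem.Chars.zfill (PySem.Int.toChars rule_num) 3
  pvG1 ++ rule_id ++ pvG2 ++ PySem.Int.toChars rule_num ++ pvG3 ++ domain ++
    pvG4 ++ PySem.Int.toChars rule_num ++ pvG5 ++ domain ++ pvG6 ++
    PySem.Int.toChars rule_num ++ pvG7 ++ PySem.Int.toChars rule_num ++ pvG8 ++
    PySem.Int.toChars rule_num ++ pvG9

-- B's while loop, carrying the running line total (same totalising fuel as A's port)
def pvLoopB (domain : List Char) (lines : Int) :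
    Int → List (List Char) → Int → Nat → List (List Char)
  | _, extras, _, 0 => extras
  | total, extras, rule_num, fuel + 1 =>
    if total < lines then
      let block := pvExtraRule domain rule_num
      pvLoopB domain lines
        (total + ((PySem.Chars.splitlines block).length : Int) +
          (if extras.isEmpty then 0 else 1))
        (extras ++ [block]) (rule_num + 1) fuel
    else extras

def make_large_fixture_content_py_alt (domain : String) (stack : String) (lines : Int) : String :=
  let base := pvFixture domain.toList stack.toList
    (PySem.Chars.upper (PySem.Chars.slice domain.toList none (some 4)) ++ "-001".toList)
  let extras := pvLoopB domain.toList lines ((PySem.Chars.splitlines base).length : Int) [] 2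
    (lines.toNat + 1)
  String.ofList (base ++ PySem.Chars.join "\n".toList extras)

-- ===== PRECONDITION & SPEC =====
def Spec_make_large_fixture_content_py (domain : String) (stack : String) (lines : Int) (out : String) : Prop := out = make_large_fixture_content_py_alt domain stack lines
instance (domain : String) (stack : String) (lines : Int) (out : String) : Decidable (Spec_make_large_fixture_content_py domain stack lines out) := by unfold Spec_make_large_fixture_content_py; infer_instance

-- ===== CLAIM (what is proved, stated in full; the proofs are below) =====
def Claim_equal_make_large_fixture_content_py : Prop := ∀ (domain : String) (stack : String) (lines : Int), Dom_make_large_fixture_content_py domain stack lines → Spec_make_large_fixture_content_py domain stack lines (make_large_fixture_content_py domain stack lines)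

-- ===== LEMMAS AND PROOFS =====

-- a list ends with a newline character
def pvEndsNl (l : List Char) : Prop := l.getLast? = some '\n'

lemma pvEndsNl_append_nl (xs : List Char) : pvEndsNl (xs ++ pvG9) := by
  unfold pvEndsNl pvG9
  rw [List.getLast?_append]
  rfl

-- the accumulator of splitlines.go is a reversed prefix of the result
lemma pv_go_acc_aux (isB : Char → Bool) :
    ∀ (n : Nat) (s : List Char), s.length ≤ n → ∀ (cur : List Char) (acc : List (List Char)),
      PySem.Chars.splitlines.go isB s cur acc =
        acc.reverse ++ PySem.Chars.splitlines.go isB s cur [] := by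
  intro n
  induction n with
  | zero =>
    intro s hs cur acc
    have hnil : s = [] := by cases s <;> simp at hs ⊢
    subst hnil
    rw [PySem.Chars.splitlines.go.eq_1, PySem.Chars.splitlines.go.eq_1]
    by_cases hc : cur.isEmpty <;> simp [hc]
  | succ n ih =>
    intro s hs cur acc
    cases s with
    | nil =>
      rw [PySem.Chars.splitlines.go.eq_1, PySem.Chars.splitlines.go.eq_1]
      by_cases hc : cur.isEmpty <;> simp [hc]
    | cons c rest =>
      by_cases hpat : c = '\r' ∧ ∃ r', rest = '\n' :: r'
      · obtain ⟨rfl, r', rfl⟩ := hpat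
        rw [PySem.Chars.splitlines.go.eq_2, PySem.Chars.splitlines.go.eq_2]
        rw [ih r' (by simp at hs; omega) [] (cur.reverse :: acc),
            ih r' (by simp at hs; omega) [] [cur.reverse]]
        simp
      · have hside : ∀ (r' : List Char), c = '\r' → rest = '\n' :: r' → False := by
          intro r' hc hr; exact hpat ⟨hc, r', hr⟩
        rw [PySem.Chars.splitlines.go.eq_3 isB cur acc c rest hside,
            PySem.Chars.splitlines.go.eq_3 isB cur [] c rest hside]
        by_cases hb : isB c
        · simp only [hb, if_true]
          rw [ih rest (by simp at hs; omega) [] (cur.reverse :: acc),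
              ih rest (by simp at hs; omega) [] [cur.reverse]]
          simp
        · simp only [hb, if_false, Bool.false_eq_true]
          exact ih rest (by simp at hs; omega) (c :: cur) acc

-- the accumulator of splitlines.go is a reversed prefix of the result
lemma pv_go_acc (isB : Char → Bool) (s cur : List Char) (acc : List (List Char)) :
    PySem.Chars.splitlines.go isB s cur acc =
      acc.reverse ++ PySem.Chars.splitlines.go isB s cur [] :=
  pv_go_acc_aux isB s.length s le_rfl cur acc

-- splitting a string that ends with '\n' distributes over append
lemma pv_go_append_aux (isB : Char → Bool) (h10 : isB '\n' = true) (_h13 : isB '\r' = true) :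
    ∀ (n : Nat) (cs : List Char), cs.length ≤ n → cs.getLast? = some '\n' →
      ∀ (ds cur : List Char),
      PySem.Chars.splitlines.go isB (cs ++ ds) cur [] =
        PySem.Chars.splitlines.go isB cs cur [] ++ PySem.Chars.splitlines.go isB ds [] [] := by
  intro n
  induction n with
  | zero =>
    intro cs hn hcs
    have : cs = [] := by cases cs <;> simp at hn ⊢
    subst this; simp at hcs
  | succ n ih =>
    intro cs hn hcs ds cur
    cases cs with
    | nil => simp at hcs
    | cons c rest =>
      by_cases hpat : c = '\r' ∧ ∃ r', rest = '\n' :: r'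
      · obtain ⟨rfl, r', rfl⟩ := hpat
        have hstep : ('\r' :: '\n' :: r') ++ ds = '\r' :: '\n' :: (r' ++ ds) := rfl
        rw [hstep, PySem.Chars.splitlines.go.eq_2, PySem.Chars.splitlines.go.eq_2]
        rw [pv_go_acc isB (r' ++ ds) [] [cur.reverse], pv_go_acc isB r' [] [cur.reverse]]
        cases r' with
        | nil =>
          simp [PySem.Chars.splitlines.go.eq_1]
        | cons x xs =>
          have hlast : (x :: xs).getLast? = some '\n' := by
            rw [List.getLast?_cons_cons, List.getLast?_cons_cons] at hcs
            exact hcs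
          rw [ih (x :: xs) (by simp at hn ⊢; omega) hlast ds []]
          simp
      · have hside : ∀ (r' : List Char), c = '\r' → rest = '\n' :: r' → False := by
          intro r' hc hr; exact hpat ⟨hc, r', hr⟩
        have hsideL : ∀ (r' : List Char), c = '\r' → rest ++ ds = '\n' :: r' → False := by
          intro r' hc hr
          cases rest with
          | nil =>
            subst hc; simp at hcs
          | cons x xs =>
            simp only [List.cons_append, List.cons.injEq] at hr
            exact hpat ⟨hc, xs, by rw [hr.1]⟩
        rw [show (c :: rest) ++ ds = c :: (rest ++ ds) from rfl,
            PySem.Chars.splitlines.go.eq_3 isB cur [] c (rest ++ ds) hsideL,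
            PySem.Chars.splitlines.go.eq_3 isB cur [] c rest hside]
        by_cases hb : isB c
        · simp only [hb, if_true]
          rw [pv_go_acc isB (rest ++ ds) [] [cur.reverse], pv_go_acc isB rest [] [cur.reverse]]
          cases rest with
          | nil => simp [PySem.Chars.splitlines.go.eq_1]
          | cons x xs =>
            have hlast : (x :: xs).getLast? = some '\n' := by
              rw [List.getLast?_cons_cons] at hcs; exact hcs
            rw [ih (x :: xs) (by simp at hn ⊢; omega) hlast ds []]
            simp
        · simp only [hb, if_false, Bool.false_eq_true]
          cases rest with
          | nil =>
            simp at hcs; subst hcs; rw [h10] at hb; simp at hb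
          | cons x xs =>
            have hlast : (x :: xs).getLast? = some '\n' := by
              rw [List.getLast?_cons_cons] at hcs; exact hcs
            exact ih (x :: xs) (by simp at hn ⊢; omega) hlast ds (c :: cur)

-- splitting a string that ends with '\n' distributes over append
lemma pv_go_append (isB : Char → Bool) (h10 : isB '\n' = true) (h13 : isB '\r' = true)
    (cs : List Char) (hcs : cs.getLast? = some '\n') (ds cur : List Char) :
    PySem.Chars.splitlines.go isB (cs ++ ds) cur [] =
      PySem.Chars.splitlines.go isB cs cur [] ++ PySem.Chars.splitlines.go isB ds [] [] :=
  pv_go_append_aux isB h10 h13 cs.length cs le_rfl hcs ds cur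

lemma pv_splitlines_append (cs ds : List Char) (h : pvEndsNl cs) :
    PySem.Chars.splitlines (cs ++ ds) =
      PySem.Chars.splitlines cs ++ PySem.Chars.splitlines ds := by
  unfold pvEndsNl at h
  rw [PySem.Chars.splitlines, PySem.Chars.splitlines, PySem.Chars.splitlines]
  exact pv_go_append _ (by decide) (by decide) cs h ds []

lemma pv_intercalate_cons_cons (sep a b : List Char) (l : List (List Char)) :
    sep.intercalate (a :: b :: l) = a ++ sep ++ sep.intercalate (b :: l) := by
  simp [List.intercalate]

lemma pv_intercalate_append_singleton (sep : List Char) (es : List (List Char)) (b : List Char)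
    (h : es ≠ []) :
    sep.intercalate (es ++ [b]) = sep.intercalate es ++ sep ++ b := by
  induction es with
  | nil => simp at h
  | cons e es ih =>
    cases es with
    | nil => simp [List.intercalate]
    | cons f fs =>
      rw [show (e :: f :: fs) ++ [b] = e :: ((f :: fs) ++ [b]) from rfl]
      rw [show (f :: fs) ++ [b] = f :: (fs ++ [b]) from rfl, pv_intercalate_cons_cons,
        ← show (f :: fs) ++ [b] = f :: (fs ++ [b]) from rfl, ih (by simp),
        pv_intercalate_cons_cons]
      simp

lemma pv_join_endsNl (es : List (List Char)) (h : es ≠ []) (he : ∀ e ∈ es, pvEndsNl e) :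
    pvEndsNl ("\n".toList.intercalate es) := by
  induction es with
  | nil => simp at h
  | cons e es ih =>
    cases es with
    | nil =>
      simpa [List.intercalate] using he e (by simp)
    | cons f fs =>
      rw [pv_intercalate_cons_cons]
      have hrec : pvEndsNl ("\n".toList.intercalate (f :: fs)) :=
        ih (by simp) (fun x hx => he x (List.mem_cons_of_mem _ hx))
      unfold pvEndsNl at hrec ⊢
      rw [List.getLast?_append, hrec]
      rfl

-- appending one newline-terminated block adds its own line count, plus the empty line the
-- '\n' join separator creates when the list was nonempty
lemma pv_count_join_append (es : List (List Char)) (b : List Char) (_hb : pvEndsNl b)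
    (he : ∀ e ∈ es, pvEndsNl e) :
    ((PySem.Chars.splitlines (PySem.Chars.join "\n".toList (es ++ [b]))).length : Int) =
      ((PySem.Chars.splitlines (PySem.Chars.join "\n".toList es)).length : Int) +
        ((PySem.Chars.splitlines b).length : Int) + (if es.isEmpty then 0 else 1) := by
  cases es with
  | nil =>
    simp [PySem.Chars.join, List.intercalate]
  | cons e es' =>
    rw [PySem.Chars.join, PySem.Chars.join,
      pv_intercalate_append_singleton _ _ _ (by simp)]
    have hj : pvEndsNl ("\n".toList.intercalate (e :: es')) :=
      pv_join_endsNl _ (by simp) he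
    rw [show "\n".toList.intercalate (e :: es') ++ "\n".toList ++ b =
          ("\n".toList.intercalate (e :: es') ++ "\n".toList) ++ b from by simp,
      pv_splitlines_append _ b (by unfold pvEndsNl; rw [List.getLast?_append]; rfl),
      pv_splitlines_append _ "\n".toList hj]
    have h1 : PySem.Chars.splitlines "\n".toList = [[]] := by decide
    rw [h1]
    simp only [List.length_append, List.length_cons, List.length_nil, List.isEmpty_cons,
      if_false, Bool.false_eq_true]
    push_cast
    ring

lemma pv_block_endsNl (domain : List Char) (rule_num : Int) :
    pvEndsNl (pvExtraRule domain rule_num) := by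
  unfold pvExtraRule
  exact pvEndsNl_append_nl _

-- the two loops agree whenever B's running total equals the line count A recomputes
lemma pv_loop_eq (domain base : List Char) (lines : Int) :
    ∀ (fuel : Nat) (extras : List (List Char)) (rule_num : Int) (total : Int),
      (∀ e ∈ extras, pvEndsNl e) →
      total = ((PySem.Chars.splitlines base).length : Int) +
        ((PySem.Chars.splitlines (PySem.Chars.join "\n".toList extras)).length : Int) →
      pvLoopA domain base lines extras rule_num fuel =
        pvLoopB domain lines total extras rule_num fuel := by
  intro fuel
  induction fuel with
  | zero => intro extras rule_num total _ _; rw [pvLoopA, pvLoopB]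
  | succ fuel ih =>
    intro extras rule_num total he htotal
    rw [pvLoopA, pvLoopB, htotal]
    by_cases hc : ((PySem.Chars.splitlines base).length : Int) +
        ((PySem.Chars.splitlines (PySem.Chars.join "\n".toList extras)).length : Int) < lines
    · simp only [hc, if_true]
      have hblock : pvEndsNl (pvExtraRule domain rule_num) := pv_block_endsNl domain rule_num
      have he' : ∀ e ∈ extras ++ [pvExtraRule domain rule_num], pvEndsNl e := by
        intro e hmem
        rcases List.mem_append.mp hmem with h | h
        · exact he e h
        · simp at h; subst h; exact hblock
      have hcount := pv_count_join_append extras (pvExtraRule domain rule_num) hblock he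
      show pvLoopA domain base lines (extras ++ [pvExtraRule domain rule_num]) (rule_num + 1) fuel = _
      rw [ih (extras ++ [pvExtraRule domain rule_num]) (rule_num + 1)
        (((PySem.Chars.splitlines base).length : Int) +
          ((PySem.Chars.splitlines (PySem.Chars.join "\n".toList extras)).length : Int) +
          ((PySem.Chars.splitlines (pvExtraRule domain rule_num)).length : Int) +
          (if extras.isEmpty then 0 else 1)) he' (by rw [hcount]; ring)]
    · simp only [hc, if_false]

-- ===== VERDICT (by name: the statement is the Claim_ definition above) =====
theorem make_large_fixture_content_py_spec : Claim_equal_make_large_fixture_content_py := by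
  intro domain stack lines _
  unfold Spec_make_large_fixture_content_py
  unfold make_large_fixture_content_py make_large_fixture_content_py_alt
  simp only []
  rw [pv_loop_eq]
  · intro e he; simp at he
  · rw [show PySem.Chars.join "\n".toList ([] : List (List Char)) = [] from rfl,
      show PySem.Chars.splitlines ([] : List Char) = [] from rfl, List.length_nil]
    omega
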